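-- pv_equiv track=rewrite | github.com/pggggggggh/Problem-Solving | 프로그래머스/2/340212. ［PCCP 기출문제］ 2번 ／ 퍼즐 게임 챌린지/［PCCP 기출문제］ 2번 ／ 퍼즐 게임 챌린지.py | solution
-- ===== SOURCE A (Python) =====
-- def solution(diffs, times, limit):
--     lo=0
--     hi=10**18
--
--     while lo+1<hi:
--         mid = lo+hi>>1
--
--         cur = 0
--         for i in range(len(diffs)):
--             if diffs[i] <= mid:
--                 cur += times[i]
--             else:
--                 cur += (diffs[i]-mid)*(times[i]+times[i-1])+times[i]
--
--         if cur <= limit: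
--             hi = mid
--         else:
--             lo = mid
--     return hi
-- ===== SOURCE B (Python) =====
-- def solution(diffs, times, limit):
--     base = 0
--     pairs = []
--     for i in range(len(diffs)):
--         base += times[i]
--         pairs.append((diffs[i], times[i] + times[i - 1]))
--     pairs.sort(key=lambda p: -p[0])
--     def cost(mid):
--         cur = base
--         for d, w in pairs:
--             if d <= mid:
--                 break
--             cur += (d - mid) * w
--         return cur
--     lo, hi = 0, 10 ** 18
--     while lo + 1 < hi:
--         mid = (lo + hi) >> 1
--         if cost(mid) <= limit:
--             hi = mid
--         else:
--             lo = mid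
--     return hi
-- ===== Notes on version B (the rewrite author's own statement) =====
-- stated objective: faster
-- what changed: B precomputes base=sum(times) and the (difficulty, weight) pairs once, sorts them descending by difficulty, and each binary-search feasibility check walks only the prefix of puzzles with difficulty > mid (early break) and adds (d-mid)*w to base, instead of A's full scan of all puzzles with a per-element branch in every iteration.
import Mathlib
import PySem

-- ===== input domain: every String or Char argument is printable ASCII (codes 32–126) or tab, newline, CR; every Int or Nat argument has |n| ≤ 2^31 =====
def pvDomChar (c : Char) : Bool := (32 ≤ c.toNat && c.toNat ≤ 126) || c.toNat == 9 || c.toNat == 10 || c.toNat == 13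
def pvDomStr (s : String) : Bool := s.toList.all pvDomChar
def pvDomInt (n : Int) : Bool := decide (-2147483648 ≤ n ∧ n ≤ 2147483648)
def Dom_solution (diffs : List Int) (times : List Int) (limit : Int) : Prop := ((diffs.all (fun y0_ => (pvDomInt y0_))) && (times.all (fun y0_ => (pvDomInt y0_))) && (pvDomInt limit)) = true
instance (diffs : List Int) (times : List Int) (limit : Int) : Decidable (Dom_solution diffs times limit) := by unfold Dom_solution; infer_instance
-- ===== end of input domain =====

-- B replaces A's full scan of all puzzles in every binary-search iteration by a pair list
-- (difficulty, weight) sorted descending once, so each feasibility check stops at the first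
-- puzzle with difficulty ≤ mid (measured faster at the large sizes in a timing run).

-- ===== PORT A =====
-- the body of A's 'for i in range(len(diffs))' loop accumulating cur
def costA (diffs times : List Int) (mid : Int) : Int :=
  (PySem.List.pyRange 0 (PySem.List.len diffs) 1).foldl
    (fun cur i =>
      if PySem.List.pyGetD diffs i 0 ≤ mid then
        cur + PySem.List.pyGetD times i 0
      else
        cur + (PySem.List.pyGetD diffs i 0 - mid) *
              (PySem.List.pyGetD times i 0 + PySem.List.pyGetD times (i - 1) 0) +
              PySem.List.pyGetD times i 0)
    0

-- A's 'while lo+1 < hi' binary search; 'lo+hi>>1' is floor division by 2 (Python-exact)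
def loopA (diffs times : List Int) (limit lo hi : Int) : Int :=
  if h : lo + 1 < hi then
    let mid := PySem.Int.floordiv (lo + hi) 2
    if costA diffs times mid ≤ limit then
      loopA diffs times limit lo mid
    else
      loopA diffs times limit mid hi
  else hi
termination_by (hi - lo).toNat
decreasing_by
  all_goals
    rw [PySem.Int.floordiv_eq_ediv_of_pos (by norm_num)]
    omega

def solution (diffs : List Int) (times : List Int) (limit : Int) : Int :=
  loopA diffs times limit 0 (10 ^ 18)

-- ===== PORT B =====
-- B's first loop: base = sum of times, pairs = [(diffs[i], times[i] + times[i-1]) …]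
def prepB (diffs times : List Int) : Int × List (Int × Int) :=
  (PySem.List.pyRange 0 (PySem.List.len diffs) 1).foldl
    (fun s i =>
      (s.1 + PySem.List.pyGetD times i 0,
       s.2 ++ [(PySem.List.pyGetD diffs i 0,
                PySem.List.pyGetD times i 0 + PySem.List.pyGetD times (i - 1) 0)]))
    (0, [])

-- B's cost(mid): walk the descending-sorted pairs, break at the first d ≤ mid
def costB (mid : Int) (cur : Int) : List (Int × Int) → Int
  | [] => cur
  | (d, w) :: rest => if d ≤ mid then cur else costB mid (cur + (d - mid) * w) rest

-- B's 'while lo+1 < hi' binary search; '(lo+hi) >> 1' is floor division by 2 (Python-exact)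
def loopB (base : Int) (pairs : List (Int × Int)) (limit lo hi : Int) : Int :=
  if h : lo + 1 < hi then
    let mid := PySem.Int.floordiv (lo + hi) 2
    if costB mid base pairs ≤ limit then
      loopB base pairs limit lo mid
    else
      loopB base pairs limit mid hi
  else hi
termination_by (hi - lo).toNat
decreasing_by
  all_goals
    rw [PySem.Int.floordiv_eq_ediv_of_pos (by norm_num)]
    omega

def solution_alt (diffs : List Int) (times : List Int) (limit : Int) : Int :=
  let p := prepB diffs times
  let pairs := PySem.List.sorted p.2 (fun q => -q.1) false   -- pairs.sort(key=lambda p: -p[0])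
  loopB p.1 pairs limit 0 (10 ^ 18)

-- ===== PRECONDITION & SPEC =====
-- Pre_ excludes exactly the inputs where A raises IndexError: diffs longer than times.
def Pre_solution (diffs : List Int) (times : List Int) (limit : Int) : Prop :=
  diffs.length ≤ times.length
instance (diffs : List Int) (times : List Int) (limit : Int) : Decidable (Pre_solution diffs times limit) := by unfold Pre_solution; infer_instance

def pvWitness_solution : List Int × List Int × Int := ([2, 5, 3], [10, 20, 30], 100)

def Spec_solution (diffs : List Int) (times : List Int) (limit : Int) (out : Int) : Prop := out = solution_alt diffs times limit
instance (diffs : List Int) (times : List Int) (limit : Int) (out : Int) : Decidable (Spec_solution diffs times limit out) := by unfold Spec_solution; infer_instance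

-- ===== CLAIM (what is proved, stated in full; the proofs are below) =====
def Claim_equal_solution : Prop := ∀ (diffs : List Int) (times : List Int) (limit : Int), Dom_solution diffs times limit → Pre_solution diffs times limit → Spec_solution diffs times limit (solution diffs times limit)

-- ===== LEMMAS AND PROOFS =====

-- abbreviations used only by the proofs
def dI (diffs : List Int) (i : Int) : Int := PySem.List.pyGetD diffs i 0
def tI (times : List Int) (i : Int) : Int := PySem.List.pyGetD times i 0
def wI (times : List Int) (i : Int) : Int := tI times i + tI times (i - 1)

-- A's inner loop, as base + penalty sum over the index range
lemma costA_eq (diffs times : List Int) (mid : Int) :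
    costA diffs times mid =
      ((PySem.List.pyRange 0 (PySem.List.len diffs) 1).map (fun i => tI times i)).sum +
      ((PySem.List.pyRange 0 (PySem.List.len diffs) 1).map
        (fun i => if dI diffs i ≤ mid then 0 else (dI diffs i - mid) * wI times i)).sum := by
  unfold costA
  rw [PySem.List.foldl_congr_mem
      (g := fun cur i => cur + (tI times i +
        (if dI diffs i ≤ mid then 0 else (dI diffs i - mid) * wI times i)))]
  · rw [PySem.List.foldl_add]
    rw [PySem.List.sum_map_add_int]
    ring
  · intro acc x _
    simp only [dI, tI, wI]
    split_ifs <;> ring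

-- B's first loop computes (Σ times[i], the unsorted pair list)
lemma prepB_eq (diffs times : List Int) :
    prepB diffs times =
      (((PySem.List.pyRange 0 (PySem.List.len diffs) 1).map (fun i => tI times i)).sum,
       (PySem.List.pyRange 0 (PySem.List.len diffs) 1).map
         (fun i => (dI diffs i, wI times i))) := by
  unfold prepB
  rw [PySem.List.foldl_prod_mk
      (f := fun a i => a + PySem.List.pyGetD times i 0)
      (g := fun a i => a ++ [(PySem.List.pyGetD diffs i 0,
        PySem.List.pyGetD times i 0 + PySem.List.pyGetD times (i - 1) 0)])]
  rw [PySem.List.foldl_add, PySem.List.foldl_append_singleton_eq_map]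
  simp only [dI, tI, wI, Prod.mk.injEq]
  constructor
  · omega
  · rfl

-- B's walk of a list of pairs = the penalty of its (mid < d)-prefix
lemma costB_eq (mid cur : Int) (l : List (Int × Int)) :
    costB mid cur l =
      cur + ((l.takeWhile (fun q => decide (mid < q.1))).map
        (fun q => (q.1 - mid) * q.2)).sum := by
  induction l generalizing cur with
  | nil => simp [costB]
  | cons q rest ih =>
    obtain ⟨d, w⟩ := q
    by_cases h : d ≤ mid
    · simp [costB, h, List.takeWhile, show ¬ (mid < d) by omega]
    · simp only [costB, if_neg h, ih, List.takeWhile, show mid < d by omega,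
        decide_true, List.map_cons, List.sum_cons]
      ring

-- on a list with descending first components the penalty sum is the prefix sum
lemma sum_ite_eq_takeWhile (mid : Int) (l : List (Int × Int))
    (h : l.Pairwise (fun a b => b.1 ≤ a.1)) :
    (l.map (fun q => if q.1 ≤ mid then 0 else (q.1 - mid) * q.2)).sum =
      ((l.takeWhile (fun q => decide (mid < q.1))).map
        (fun q => (q.1 - mid) * q.2)).sum := by
  induction l with
  | nil => simp
  | cons q rest ih =>
    rcases List.pairwise_cons.mp h with ⟨hq, hrest⟩
    by_cases hd : q.1 ≤ mid
    · simp only [List.map_cons, List.sum_cons, if_pos hd, List.takeWhile,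
        show ¬ (mid < q.1) by omega, decide_false]
      have hz : (rest.map (fun r => if r.1 ≤ mid then 0 else (r.1 - mid) * r.2)).sum = 0 := by
        apply List.sum_eq_zero
        intro x hx
        rcases List.mem_map.mp hx with ⟨r, hr, rfl⟩
        have := hq r hr
        rw [if_pos (by omega)]
      simp [hz]
    · simp only [List.map_cons, List.sum_cons, if_neg hd, List.takeWhile,
        show mid < q.1 by omega, decide_true, ih hrest]

-- the two cost functions agree for every threshold
lemma cost_agree (diffs times : List Int) (mid : Int) :
    costA diffs times mid =
      costB mid (prepB diffs times).1
        (PySem.List.sorted (prepB diffs times).2 (fun q => -q.1) false) := by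
  rw [costA_eq, costB_eq, prepB_eq]
  congr 1
  set P := (PySem.List.pyRange 0 (PySem.List.len diffs) 1).map
    (fun i => (dI diffs i, wI times i)) with hP
  set S := PySem.List.sorted P (fun q => -q.1) false with hS
  have hperm : S.Perm P := PySem.List.sorted_perm P (fun q => -q.1) false
  have hpair : S.Pairwise (fun a b => b.1 ≤ a.1) := by
    have := PySem.List.sorted_pairwise P (fun q => -q.1)
    rw [← hS] at this
    exact this.imp (by intro a b hab; omega)
  rw [← sum_ite_eq_takeWhile mid S hpair]
  calc ((PySem.List.pyRange 0 (PySem.List.len diffs) 1).map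
          (fun i => if dI diffs i ≤ mid then 0 else (dI diffs i - mid) * wI times i)).sum
      = (P.map (fun q => if q.1 ≤ mid then 0 else (q.1 - mid) * q.2)).sum := by
        rw [hP, List.map_map]; rfl
    _ = (S.map (fun q => if q.1 ≤ mid then 0 else (q.1 - mid) * q.2)).sum :=
        ((hperm.map _).sum_eq).symm

-- the two binary searches agree whenever their cost functions agree
lemma loops_eq (diffs times : List Int) (limit base : Int) (pairs : List (Int × Int))
    (hc : ∀ mid, costA diffs times mid = costB mid base pairs) :
    ∀ n lo hi, (hi - lo).toNat = n →
      loopA diffs times limit lo hi = loopB base pairs limit lo hi := by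
  intro n
  induction n using Nat.strong_induction_on with
  | _ n ih =>
    intro lo hi hn
    rw [loopA, loopB]
    by_cases h : lo + 1 < hi
    · simp only [dif_pos h, hc]
      have hm : PySem.Int.floordiv (lo + hi) 2 = (lo + hi) / 2 :=
        PySem.Int.floordiv_eq_ediv_of_pos (by norm_num)
      split_ifs with hcmp
      · exact ih _ (by rw [← hn]; rw [hm]; omega) lo _ rfl
      · exact ih _ (by rw [← hn]; rw [hm]; omega) _ hi rfl
    · simp [dif_neg h]

-- ===== VERDICT (by name: the statement is the Claim_ definition above) =====
theorem solution_spec : Claim_equal_solution := by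
  intro diffs times limit _ _
  unfold Spec_solution solution solution_alt
  exact loops_eq diffs times limit _ _ (fun mid => cost_agree diffs times mid) _ 0 (10 ^ 18) rfl
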